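-- pv_equiv track=rewrite | github.com/RW21/competitive-code | atcoder/abc106/b.py | solve
-- ===== SOURCE A (Python) =====
-- def solve(num):
--     c = 0
--     for i in range(1, num + 1):
--         if num % i == 0:
--             c += 1
--     if c == 8 and num % 2 == 1:
--         return True
--     return False
-- ===== SOURCE B (Python) =====
-- def solve(num):
--     if num <= 0 or num % 2 == 0:
--         return False
--     c = 0
--     i = 1
--     while i * i <= num:
--         if num % i == 0:
--             c += 1 if i * i == num else 2
--         i += 1
--     return c == 8
-- ===== Notes on version B (the rewrite author's own statement) =====
-- stated objective: faster
-- what changed: B counts divisors by trial division only up to sqrt(num) (each small divisor d pairs with num/d) and rejects even or non-positive num immediately, instead of A's full scan of 1..num.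
import Mathlib
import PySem

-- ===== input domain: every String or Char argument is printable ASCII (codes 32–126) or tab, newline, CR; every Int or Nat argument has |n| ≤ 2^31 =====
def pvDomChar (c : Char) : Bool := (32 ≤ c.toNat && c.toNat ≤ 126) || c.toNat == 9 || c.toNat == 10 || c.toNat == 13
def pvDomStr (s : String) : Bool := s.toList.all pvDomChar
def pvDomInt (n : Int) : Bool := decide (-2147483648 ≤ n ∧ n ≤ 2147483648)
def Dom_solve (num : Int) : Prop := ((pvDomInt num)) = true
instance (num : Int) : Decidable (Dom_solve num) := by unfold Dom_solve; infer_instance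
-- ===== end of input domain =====

-- B counts divisors by trial division only up to sqrt(num), pairing each small divisor d with num/d,
-- and rejects even or non-positive num at once, instead of A's full scan of 1..num.

-- ===== PORT A =====
def solve (num : Int) : Bool :=
  let c := (PySem.List.pyRange 1 (num + 1) 1).foldl
    (fun c i => if PySem.Int.mod num i == 0 then c + 1 else c) (0 : Int)
  if c == 8 && PySem.Int.mod num 2 == 1 then true else false

-- ===== PORT B =====
-- the `while i * i <= num` loop of Source B; terminates because i increases towards sqrt(num)
def solveAltLoop (num i c : Int) : Int :=
  if _h : i * i ≤ num then
    solveAltLoop num (i + 1)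
      (if PySem.Int.mod num i == 0 then c + (if i * i == num then 1 else 2) else c)
  else c
termination_by (num + 1 - i).toNat
decreasing_by
  have hi : i ≤ num := by
    by_cases h0 : i ≤ 0
    · nlinarith
    · nlinarith
  omega

def solve_alt (num : Int) : Bool :=
  if num ≤ 0 || PySem.Int.mod num 2 == 0 then false
  else solveAltLoop num 1 0 == 8

-- ===== PRECONDITION & SPEC =====
def Spec_solve (num : Int) (out : Bool) : Prop := out = solve_alt num
instance (num : Int) (out : Bool) : Decidable (Spec_solve num out) := by unfold Spec_solve; infer_instance

-- ===== CLAIM (what is proved, stated in full; the proofs are below) =====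
def Claim_equal_solve : Prop := ∀ (num : Int), Dom_solve num → Spec_solve num (solve num)

-- ===== LEMMAS AND PROOFS =====

theorem countP_range_eq_sum (m : ℕ) (p : ℕ → Bool) :
    ((List.range m).countP p : ℕ) = ∑ k ∈ Finset.range m, (if p k then 1 else 0) := by
  induction m with
  | zero => simp
  | succ m ih =>
      rw [List.range_succ, Finset.sum_range_succ, List.countP_append, ih]
      simp [List.countP_cons]

theorem foldl_count (p : ℤ → Bool) (xs : List ℤ) (c : ℤ) :
    xs.foldl (fun c i => if p i then c + 1 else c) c = c + xs.countP p := by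
  induction xs generalizing c with
  | nil => simp
  | cons x xs ih =>
      simp only [List.foldl_cons, List.countP_cons, ih]
      split <;> simp_all <;> ring

-- A's count of i ∈ [1, N] dividing N is the number of divisors of N.
theorem a_count_eq_card (N : ℕ) (hN : 1 ≤ N) :
    ((PySem.List.pyRange 1 ((N : ℤ) + 1) 1).foldl
      (fun c i => if PySem.Int.mod (N : ℤ) i == 0 then c + 1 else c) (0 : ℤ))
    = (N.divisors.card : ℤ) := by
  rw [PySem.List.pyRange_one, foldl_count]
  have h1 : ((N : ℤ) + 1 - 1).toNat = N := by omega
  rw [h1, List.countP_map]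
  have h2 : ∀ k ∈ List.range N,
      ((fun i => PySem.Int.mod (N : ℤ) i == 0) ∘ fun k : ℕ => (1 : ℤ) + k) k
        = decide ((1 + k) ∣ N) := by
    intro k _
    simp only [Function.comp]
    rw [Bool.eq_iff_iff]
    simp only [beq_iff_eq, decide_eq_true_eq]
    rw [PySem.Int.mod_eq_zero_iff_dvd]
    constructor
    · intro h; exact_mod_cast h
    · intro h; exact_mod_cast h
  rw [List.countP_congr (fun x hx => by rw [h2 x hx])]
  have h3 := countP_range_eq_sum N (fun k => decide ((1 + k) ∣ N))
  have h4 : N.divisors.card = ∑ k ∈ Finset.range N, (if (1 + k) ∣ N then 1 else 0) := by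
    rw [Nat.divisors, Finset.card_filter, Finset.sum_Ico_eq_sum_range]
    simp
  rw [h4]
  push_cast [h3]
  simp

-- the pairing d ↦ N/d between divisors below and above √N
theorem div_mem_swap (N d : ℕ) (hN : N ≠ 0) (hdvd : d ∣ N) (h : d * d < N) :
    N / d ∣ N ∧ N < (N / d) * (N / d) := by
  obtain ⟨e, he⟩ := hdvd
  have hd0 : 0 < d := Nat.pos_of_dvd_of_pos ⟨e, he⟩ (by omega)
  have hdiv : N / d = e := by rw [he]; exact Nat.mul_div_cancel_left e hd0
  have hde : d < e := by nlinarith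
  constructor
  · exact hdiv ▸ ⟨d, by rw [he]; ring⟩
  · rw [hdiv]; nlinarith

theorem card_small_eq_card_big (N : ℕ) (_hN : 1 ≤ N) :
    (N.divisors.filter (fun d => d * d < N)).card
      = (N.divisors.filter (fun d => N < d * d)).card := by
  apply Finset.card_bij' (fun d _ => N / d) (fun d _ => N / d)
  · intro d hd
    simp only [Finset.mem_filter, Nat.mem_divisors] at hd ⊢
    obtain ⟨⟨hdvd, hne⟩, hlt⟩ := hd
    obtain ⟨h1, h2⟩ := div_mem_swap N d hne hdvd hlt
    exact ⟨⟨h1, hne⟩, h2⟩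
  · intro d hd
    simp only [Finset.mem_filter, Nat.mem_divisors] at hd ⊢
    obtain ⟨⟨hdvd, hne⟩, hlt⟩ := hd
    obtain ⟨e, he⟩ := hdvd
    have hd0 : 0 < d := Nat.pos_of_dvd_of_pos ⟨e, he⟩ (by omega)
    have hdiv : N / d = e := by rw [he]; exact Nat.mul_div_cancel_left e hd0
    have he0 : 0 < e := by
      rcases Nat.eq_zero_or_pos e with h | h
      · subst h; omega
      · exact h
    have hed : e < d := by nlinarith
    refine ⟨⟨hdiv ▸ ⟨d, by rw [he]; ring⟩, hne⟩, ?_⟩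
    rw [hdiv]; nlinarith
  · intro d hd
    simp only [Finset.mem_filter, Nat.mem_divisors] at hd
    exact Nat.div_div_self hd.1.1 hd.1.2
  · intro d hd
    simp only [Finset.mem_filter, Nat.mem_divisors] at hd
    exact Nat.div_div_self hd.1.1 hd.1.2

-- divisors d with d*d ≤ N, weighted 2 (or 1 when d*d = N), count all divisors
theorem sum_weights_eq_card (N : ℕ) (hN : 1 ≤ N) :
    (∑ d ∈ N.divisors.filter (fun d => d * d ≤ N), (if d * d = N then 1 else 2) : ℕ)
      = N.divisors.card := by
  have hsplit : ∀ d : ℕ, (if d * d = N then 1 else 2) = 1 + (if ¬ d * d = N then 1 else 0) := by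
    intro d; split_ifs <;> simp_all
  calc (∑ d ∈ N.divisors.filter (fun d => d * d ≤ N), (if d * d = N then 1 else 2) : ℕ)
      = ∑ d ∈ N.divisors.filter (fun d => d * d ≤ N), (1 + if ¬ d * d = N then 1 else 0) := by
        exact Finset.sum_congr rfl (fun d _ => hsplit d)
    _ = (N.divisors.filter (fun d => d * d ≤ N)).card
        + ((N.divisors.filter (fun d => d * d ≤ N)).filter (fun d => ¬ d * d = N)).card := by
        rw [Finset.sum_add_distrib, Finset.sum_const, smul_eq_mul, mul_one]
        congr 1
        rw [Finset.card_filter]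
    _ = (N.divisors.filter (fun d => d * d ≤ N)).card
        + (N.divisors.filter (fun d => d * d < N)).card := by
        rw [Finset.filter_filter]
        congr 1
        apply congrArg Finset.card
        apply Finset.filter_congr
        intro x _
        constructor
        · rintro ⟨h1, h2⟩; omega
        · intro h; exact ⟨by omega, by omega⟩
    _ = (N.divisors.filter (fun d => d * d ≤ N)).card
        + (N.divisors.filter (fun d => N < d * d)).card := by
        rw [card_small_eq_card_big N hN]
    _ = N.divisors.card := by
        have := Finset.card_filter_add_card_filter_not
          (s := N.divisors) (p := fun d => d * d ≤ N)
        simpa [not_le] using this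

theorem filter_empty_of_big (N : ℕ) (i : ℤ) (h : ¬ i * i ≤ (N : ℤ)) (hi : 1 ≤ i) :
    N.divisors.filter (fun d => i.toNat ≤ d ∧ d * d ≤ N) = ∅ := by
  apply Finset.filter_eq_empty_iff.mpr
  intro d _
  rintro ⟨h1, h2⟩
  have hii : N < i.toNat * i.toNat := by
    have : (N : ℤ) < i * i := by omega
    have h3 : ((i.toNat : ℤ)) = i := by omega
    rw [← h3] at this
    exact_mod_cast this
  nlinarith

-- B's while loop accumulates exactly the weighted count of divisors d ≥ i with d*d ≤ N.
theorem b_loop_aux (N : ℕ) (hN : 1 ≤ N) :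
    ∀ (k : ℕ) (i c : ℤ), 1 ≤ i → N + 1 - i.toNat = k →
    solveAltLoop (N : ℤ) i c
      = c + ((∑ d ∈ N.divisors.filter (fun d => i.toNat ≤ d ∧ d * d ≤ N),
          (if d * d = N then 1 else 2) : ℕ) : ℤ) := by
  intro k
  induction k with
  | zero =>
      intro i c hi hk
      rw [solveAltLoop]
      have hg : ¬ i * i ≤ (N : ℤ) := by
        have h1 : (N : ℤ) < i := by omega
        nlinarith
      rw [dif_neg hg, filter_empty_of_big N i hg hi]
      simp
  | succ k ih =>
      intro i c hi hk
      rw [solveAltLoop]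
      by_cases hg : i * i ≤ (N : ℤ)
      · rw [dif_pos hg]
        have hiN : i ≤ (N : ℤ) := by nlinarith
        have hrec := ih (i + 1) (if PySem.Int.mod (N : ℤ) i == 0 then c + (if i * i == (N : ℤ) then 1 else 2) else c) (by omega) (by omega)
        rw [hrec]
        have hcast : ((i.toNat : ℤ)) = i := by omega
        have hsq : i.toNat * i.toNat ≤ N := by
          have : ((i.toNat * i.toNat : ℕ) : ℤ) ≤ (N : ℤ) := by push_cast [hcast]; exact hg
          exact_mod_cast this
        have hset : N.divisors.filter (fun d => i.toNat ≤ d ∧ d * d ≤ N)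
            = (if i.toNat ∣ N then insert i.toNat (N.divisors.filter (fun d => (i + 1).toNat ≤ d ∧ d * d ≤ N))
               else N.divisors.filter (fun d => (i + 1).toNat ≤ d ∧ d * d ≤ N)) := by
          split_ifs with hdvd
          · apply Finset.ext; intro d
            simp only [Finset.mem_filter, Finset.mem_insert, Nat.mem_divisors]
            constructor
            · rintro ⟨hd, h1, h2⟩
              by_cases hdi : d = i.toNat
              · exact Or.inl hdi
              · exact Or.inr ⟨hd, by omega, h2⟩
            · rintro (rfl | ⟨hd, h1, h2⟩)
              · exact ⟨⟨hdvd, by omega⟩, le_refl _, hsq⟩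
              · exact ⟨hd, by omega, h2⟩
          · apply Finset.ext; intro d
            simp only [Finset.mem_filter, Nat.mem_divisors]
            constructor
            · rintro ⟨hd, h1, h2⟩
              refine ⟨hd, ?_, h2⟩
              rcases Nat.eq_or_lt_of_le h1 with h | h
              · exact absurd (h ▸ hd.1) hdvd
              · omega
            · rintro ⟨hd, h1, h2⟩
              exact ⟨hd, by omega, h2⟩
        rw [hset]
        have hmod : (PySem.Int.mod (N : ℤ) i == 0) = decide (i.toNat ∣ N) := by
          rw [Bool.eq_iff_iff]
          simp only [beq_iff_eq, decide_eq_true_eq]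
          rw [PySem.Int.mod_eq_zero_iff_dvd]
          constructor
          · intro h
            have : i ∣ (N : ℤ) := h
            rw [← hcast] at this
            exact_mod_cast this
          · intro h
            rw [← hcast]
            exact_mod_cast h
        by_cases hdvd : i.toNat ∣ N
        · rw [if_pos hdvd, hmod]
          simp only [hdvd, decide_true, if_true]
          rw [Finset.sum_insert (by
            simp only [Finset.mem_filter]
            rintro ⟨_, h1, _⟩
            omega)]
          have hw : ((if i * i == (N : ℤ) then 1 else 2) : ℤ)
              = ((if i.toNat * i.toNat = N then 1 else 2 : ℕ) : ℤ) := by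
            rw [Bool.beq_eq_decide_eq]
            by_cases hq : i.toNat * i.toNat = N
            · have : i * i = (N : ℤ) := by rw [← hcast]; exact_mod_cast hq
              simp [hq, this]
            · have : ¬ i * i = (N : ℤ) := by
                intro hc
                apply hq
                have : ((i.toNat * i.toNat : ℕ) : ℤ) = (N : ℤ) := by push_cast [hcast]; exact hc
                exact_mod_cast this
              simp [hq, this]
          push_cast
          rw [hw]
          push_cast
          ring
        · rw [if_neg hdvd, hmod]
          simp [hdvd]
      · rw [dif_neg hg, filter_empty_of_big N i hg hi]
        simp

-- ===== VERDICT (by name: the statement is the Claim_ definition above) =====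
theorem solve_spec : Claim_equal_solve := by
  intro num _
  unfold Spec_solve
  by_cases h0 : num ≤ 0
  · have hrange : PySem.List.pyRange 1 (num + 1) 1 = [] :=
      PySem.List.pyRange_one_eq_nil (by omega)
    simp [solve, solve_alt, hrange, h0]
  · rw [not_le] at h0
    obtain ⟨N, rfl⟩ : ∃ N : ℕ, num = (N : ℤ) := ⟨num.toNat, by omega⟩
    have hN : 1 ≤ N := by omega
    have hmod2 : PySem.Int.mod (N : ℤ) 2 = 0 ∨ PySem.Int.mod (N : ℤ) 2 = 1 := by
      have h1 := PySem.Int.mod_nonneg (N : ℤ) (b := 2) (by omega)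
      have h2 := PySem.Int.mod_lt (N : ℤ) (b := 2) (by omega)
      omega
    rcases hmod2 with he | he
    · have ha : solve (N : ℤ) = false := by
        simp only [solve, he]
        simp
      have hb : solve_alt (N : ℤ) = false := by
        simp only [solve_alt, he]
        simp
      rw [ha, hb]
    · have hloop := b_loop_aux N hN N 1 0 (by omega) (by omega)
      have hfe : N.divisors.filter (fun d => (1 : ℤ).toNat ≤ d ∧ d * d ≤ N)
          = N.divisors.filter (fun d => d * d ≤ N) := by
        apply Finset.filter_congr
        intro d hd
        have := Nat.pos_of_mem_divisors hd
        simp only [Int.toNat_one]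
        constructor
        · rintro ⟨_, h⟩; exact h
        · intro h; exact ⟨by omega, h⟩
      rw [hfe, sum_weights_eq_card N hN] at hloop
      have hnot : ¬ ((N : ℤ) ≤ 0) := by omega
      have he' : (N : ℤ) % 2 = 1 := by
        rw [← PySem.Int.mod_eq_emod_of_pos (b := 2) (by omega)]; exact he
      have hd2 : ¬ ((2 : ℤ) ∣ (N : ℤ)) := by omega
      have ha : solve (N : ℤ) = decide (N.divisors.card = 8) := by
        simp only [solve]
        rw [a_count_eq_card N hN]
        simp [he']
        omega
      have hb : solve_alt (N : ℤ) = decide (N.divisors.card = 8) := by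
        simp only [solve_alt]
        rw [hloop]
        simp [he', hd2, hnot]
        have hne : N ≠ 0 := by omega
        simp [hne]
        rw [Bool.eq_iff_iff]
        simp
        omega
      rw [ha, hb]
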